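-- pv_equiv track=rewrite | github.com/fmromeiro/string-partition-experiments | src/utils/inter.py | _find_abundant_run_from
-- ===== SOURCE A (Python) =====
-- def _find_abundant_run_from(string, start, abundant):
--     for i in range(start, len(string)):
--         if string[i] in abundant: break
--     else: return (-1, None)
--
--     for j in range(i+1, len(string)):
--         if string[j] not in abundant: break
--     else: j = len(string) + 1
--
--     return (i, string[i:j])
-- ===== SOURCE B (Python) =====
-- def _find_abundant_run_from(string, start, abundant):
--     # Single fused pass: a run-detecting state machine over the index range
--     # (A does two separate break/else loops).  `i` is None until the run starts;
--     # the run is emitted as soon as it ends, or after the loop if it reaches the end.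
--     i = None
--     for k in range(start, len(string)):
--         if string[k] in abundant:
--             if i is None:
--                 i = k
--         elif i is not None:
--             return (i, string[i:k])
--     if i is None:
--         return (-1, None)
--     return (i, string[i:])
-- ===== Notes on version B (the rewrite author's own statement) =====
-- stated objective: simpler
-- what changed: Replaced A's two sequential for/else break loops (find run start, then find run end, with a j=len+1 sentinel) by one fused single-pass state machine over the index range that carries the optional run start and emits the run the moment it ends.
import Mathlib
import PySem

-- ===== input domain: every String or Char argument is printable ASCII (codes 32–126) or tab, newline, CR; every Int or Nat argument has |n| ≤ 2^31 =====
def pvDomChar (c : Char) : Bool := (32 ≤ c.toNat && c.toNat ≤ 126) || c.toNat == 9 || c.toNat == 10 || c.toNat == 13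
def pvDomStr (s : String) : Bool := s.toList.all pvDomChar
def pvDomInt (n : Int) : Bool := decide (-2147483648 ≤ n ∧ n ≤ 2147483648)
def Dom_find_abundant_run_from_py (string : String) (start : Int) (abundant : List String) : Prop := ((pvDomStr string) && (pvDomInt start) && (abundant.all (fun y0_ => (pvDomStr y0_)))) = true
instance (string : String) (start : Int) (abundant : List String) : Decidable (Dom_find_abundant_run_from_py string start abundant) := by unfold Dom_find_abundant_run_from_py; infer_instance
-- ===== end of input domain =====

-- B replaces A's two break/else loops by one fused run-detecting pass (simpler decomposition, same cost).
-- Both Pythons raise IndexError iff start < -len(string); Pre_ excludes exactly those inputs.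

-- ===== PORT A =====
-- `string[i] in abundant` (shared by both sources verbatim; out-of-range = Python raise, unreachable under Pre_)
def pvIsAbundantAt (string : String) (abundant : List String) (i : Int) : Bool :=
  match PySem.Str.pyGet? string i with
  | some c => abundant.contains (String.singleton c)
  | none => false

-- first loop: `for i in range(start, len(string)): if string[i] in abundant: break / else: return`
def pvALoop1 (string : String) (abundant : List String) : List Int → Option Int
  | [] => none
  | i :: rest => if pvIsAbundantAt string abundant i then some i else pvALoop1 string abundant rest

-- second loop: `for j in range(i+1, len(string)): if string[j] not in abundant: break / else: j = len+1`
def pvALoop2 (string : String) (abundant : List String) (dflt : Int) : List Int → Int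
  | [] => dflt
  | j :: rest => if !(pvIsAbundantAt string abundant j) then j else pvALoop2 string abundant dflt rest

def find_abundant_run_from_py (string : String) (start : Int) (abundant : List String) : Int × Option String :=
  let n := PySem.Str.len string
  match pvALoop1 string abundant (PySem.List.pyRange start n 1) with
  | none => (-1, none)
  | some i =>
      let j := pvALoop2 string abundant (n + 1) (PySem.List.pyRange (i + 1) n 1)
      (i, some (PySem.Str.slice string (some i) (some j)))

-- ===== PORT B =====
-- single pass with optional run start `i?`; emits the run when it ends or at end of input
def pvBLoop (string : String) (abundant : List String) (i? : Option Int) : List Int → Int × Option String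
  | [] =>
      match i? with
      | none => (-1, none)
      | some i => (i, some (PySem.Str.slice string (some i) none))
  | k :: rest =>
      if pvIsAbundantAt string abundant k then
        match i? with
        | none => pvBLoop string abundant (some k) rest
        | some _ => pvBLoop string abundant i? rest
      else
        match i? with
        | none => pvBLoop string abundant none rest
        | some i => (i, some (PySem.Str.slice string (some i) (some k)))

def find_abundant_run_from_py_alt (string : String) (start : Int) (abundant : List String) : Int × Option String :=
  pvBLoop string abundant none (PySem.List.pyRange start (PySem.Str.len string) 1)

-- ===== PRECONDITION & SPEC =====
-- Pre_ excludes exactly the inputs where Python A raises IndexError: start < -len(string).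
def Pre_find_abundant_run_from_py (string : String) (start : Int) (abundant : List String) : Prop :=
  -(PySem.Str.len string) ≤ start
instance (string : String) (start : Int) (abundant : List String) : Decidable (Pre_find_abundant_run_from_py string start abundant) := by unfold Pre_find_abundant_run_from_py; infer_instance
def pvWitness_find_abundant_run_from_py : String × Int × List String := ("xaab", 0, ["a"])

def Spec_find_abundant_run_from_py (string : String) (start : Int) (abundant : List String) (out : Int × Option String) : Prop := out = find_abundant_run_from_py_alt string start abundant
instance (string : String) (start : Int) (abundant : List String) (out : Int × Option String) : Decidable (Spec_find_abundant_run_from_py string start abundant out) := by unfold Spec_find_abundant_run_from_py; infer_instance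

-- ===== CLAIM (what is proved, stated in full; the proofs are below) =====
def Claim_equal_find_abundant_run_from_py : Prop := ∀ (string : String) (start : Int) (abundant : List String), Dom_find_abundant_run_from_py string start abundant → Pre_find_abundant_run_from_py string start abundant → Spec_find_abundant_run_from_py string start abundant (find_abundant_run_from_py string start abundant)

-- ===== LEMMAS AND PROOFS =====

-- slicing to (or past) the end equals slicing with no stop bound
lemma pv_slice_end (string : String) (i b : Int) (hb : PySem.Str.len string ≤ b) :
    PySem.Str.slice string (some i) (some b) = PySem.Str.slice string (some i) none := by
  simp [PySem.Str.slice, PySem.List.slice, PySem.List.clampIdx, PySem.Str.len_eq] at *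
  congr 2
  split_ifs <;> omega

-- phase 2: B's loop with the run already started = A's second loop computing j, then slicing
lemma pv_phase2 (string : String) (abundant : List String) (i s : Int) :
    pvBLoop string abundant (some i) (PySem.List.pyRange s (PySem.Str.len string) 1) =
      (i, some (PySem.Str.slice string (some i)
        (some (pvALoop2 string abundant (PySem.Str.len string + 1)
          (PySem.List.pyRange s (PySem.Str.len string) 1))))) := by
  suffices H : ∀ (m : Nat) (s : Int), (PySem.Str.len string - s).toNat = m →
      pvBLoop string abundant (some i) (PySem.List.pyRange s (PySem.Str.len string) 1) =
        (i, some (PySem.Str.slice string (some i)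
          (some (pvALoop2 string abundant (PySem.Str.len string + 1)
            (PySem.List.pyRange s (PySem.Str.len string) 1))))) from H _ s rfl
  intro m
  induction m using Nat.strong_induction_on with
  | _ m ih =>
    intro s hm
    by_cases hs : PySem.Str.len string ≤ s
    · rw [PySem.List.pyRange_one_eq_nil hs]
      simp only [pvBLoop, pvALoop2,
        ← pv_slice_end string i (PySem.Str.len string + 1) (by omega)]
    · push Not at hs
      rw [PySem.List.pyRange_one_cons hs]
      by_cases hk : pvIsAbundantAt string abundant s
      · simp only [pvBLoop, pvALoop2, hk, Bool.not_true, if_true]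
        exact ih (PySem.Str.len string - (s + 1)).toNat (by omega) (s + 1) rfl
      · simp [pvBLoop, pvALoop2, hk]

-- phase 1: B's loop with no run started = dispatch on A's first loop
lemma pv_phase1 (string : String) (abundant : List String) (s : Int) :
    pvBLoop string abundant none (PySem.List.pyRange s (PySem.Str.len string) 1) =
      (match pvALoop1 string abundant (PySem.List.pyRange s (PySem.Str.len string) 1) with
       | none => (-1, none)
       | some i => pvBLoop string abundant (some i)
           (PySem.List.pyRange (i + 1) (PySem.Str.len string) 1)) := by
  suffices H : ∀ (m : Nat) (s : Int), (PySem.Str.len string - s).toNat = m →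
      pvBLoop string abundant none (PySem.List.pyRange s (PySem.Str.len string) 1) =
        (match pvALoop1 string abundant (PySem.List.pyRange s (PySem.Str.len string) 1) with
         | none => (-1, none)
         | some i => pvBLoop string abundant (some i)
             (PySem.List.pyRange (i + 1) (PySem.Str.len string) 1)) from H _ s rfl
  intro m
  induction m using Nat.strong_induction_on with
  | _ m ih =>
    intro s hm
    by_cases hs : PySem.Str.len string ≤ s
    · rw [PySem.List.pyRange_one_eq_nil hs]
      simp [pvBLoop, pvALoop1]
    · push Not at hs
      rw [PySem.List.pyRange_one_cons hs]
      by_cases hk : pvIsAbundantAt string abundant s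
      · simp [pvBLoop, pvALoop1, hk]
      · simp only [pvBLoop, pvALoop1, hk]
        exact ih (PySem.Str.len string - (s + 1)).toNat (by omega) (s + 1) rfl

-- ===== VERDICT (by name: the statement is the Claim_ definition above) =====
theorem find_abundant_run_from_py_spec : Claim_equal_find_abundant_run_from_py := by
  intro string start abundant _ _
  unfold Spec_find_abundant_run_from_py find_abundant_run_from_py find_abundant_run_from_py_alt
  rw [pv_phase1]
  cases h : pvALoop1 string abundant (PySem.List.pyRange start (PySem.Str.len string) 1) with
  | none => simp only [h]
  | some i =>
      simp only [h]
      exact (pv_phase2 string abundant i (i + 1)).symm
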